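-- pv_equiv track=rewrite | github.com/joshanashakya/dissertation | workspace/dataset/java-python/GeeksForGeeks/1405/A/2.py | valueofX
-- ===== SOURCE A (Python) =====
-- def valueofX(ar, n):
--     summ = sum(ar)
--
--     if (summ % n == 0):
--         return summ // n
--     else:
--         A = summ // n
--         B = summ // n + 1
--         ValueA = 0
--         ValueB = 0
--
--         # Check for both possibilities
--         for i in range(n):
--             ValueA += (ar[i] - A) * (ar[i] - A)
--             ValueB += (ar[i] - B) * (ar[i] - B)
--
--         if (ValueA < ValueB):
--             return A
--         else:
--             return B
-- ===== SOURCE B (Python) =====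
-- def valueofX(ar, n):
--     q, r = divmod(sum(ar), n)
--     return q if 2 * r < n else q + 1
-- ===== Notes on version B (the rewrite author's own statement) =====
-- stated objective: simpler
-- what changed: Replaced the candidate-comparison loop over squared deviations by divmod plus the closed-form tie test 2*r < n (from the telescoped identity ValueA - ValueB = 2r - n); Pre_ restricts to the intended domain n = len(ar) (plus the divisible case, where the loop never runs), because for other n the meaning of the parameter is unspecified: A raises for n > len(ar) when the sum is not divisible, and for n < len(ar) or n < 0 it compares only a prefix (or nothing) of the array while summing all of it.
-- outside the precondition, e.g. on valueofX([1, 2, 4, 10], 3): A returns 5, B returns 6; on valueofX([1], -3): A returns 0, B returns -1; on valueofX([2, 4], -2): A returns -3, B returns -2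
import Mathlib
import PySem

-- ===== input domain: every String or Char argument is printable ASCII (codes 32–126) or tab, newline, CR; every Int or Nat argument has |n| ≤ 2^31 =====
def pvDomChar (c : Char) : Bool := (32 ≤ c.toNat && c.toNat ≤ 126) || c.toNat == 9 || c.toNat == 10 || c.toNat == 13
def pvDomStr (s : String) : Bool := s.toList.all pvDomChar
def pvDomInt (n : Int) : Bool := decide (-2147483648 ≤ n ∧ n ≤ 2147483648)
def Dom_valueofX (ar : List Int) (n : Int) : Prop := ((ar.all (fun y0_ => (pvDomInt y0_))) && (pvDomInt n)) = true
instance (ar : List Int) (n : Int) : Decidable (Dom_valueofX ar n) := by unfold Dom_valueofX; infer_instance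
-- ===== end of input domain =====

-- B replaces A's squared-deviation comparison loop by divmod and the closed-form test 2*r < n; Pre_ restricts to the intended domain n = len(ar) (plus the divisible case).


-- ===== PORT A =====
def valueofX (ar : List Int) (n : Int) : Int :=
  let summ := ar.foldl (· + ·) 0
  if PySem.Int.mod summ n = 0 then
    PySem.Int.floordiv summ n
  else
    let A := PySem.Int.floordiv summ n
    let B := PySem.Int.floordiv summ n + 1
    -- for i in range(n): ValueA += (ar[i]-A)*(ar[i]-A); ValueB += (ar[i]-B)*(ar[i]-B)
    let v := (PySem.List.pyRange 0 n 1).foldl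
      (fun (p : Int × Int) i =>
        let x := PySem.List.pyGetD ar i 0
        (p.1 + (x - A) * (x - A), p.2 + (x - B) * (x - B))) (0, 0)
    if v.1 < v.2 then A else B

-- ===== PORT B =====
def valueofX_alt (ar : List Int) (n : Int) : Int :=
  let s := ar.foldl (· + ·) 0
  let q := PySem.Int.floordiv s n
  let r := PySem.Int.mod s n
  if 2 * r < n then q else q + 1

-- ===== PRECONDITION & SPEC =====
-- Pre_ restricts to the function's intended domain n = len(ar) > 0 (plus the divisible case, where
-- A's loop never runs): for other n the meaning of the parameter is unspecified — A raises for
-- n > len(ar) with a non-divisible sum (IndexError) and n = 0 (ZeroDivisionError), and for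
-- n < len(ar) or n < 0 it compares only a prefix (or nothing) of the array while summing all of it.
def Pre_valueofX (ar : List Int) (n : Int) : Prop := 0 < n ∧ (n = (ar.length : Int) ∨ n ∣ ar.sum)
instance (ar : List Int) (n : Int) : Decidable (Pre_valueofX ar n) := by unfold Pre_valueofX; infer_instance
def pvWitness_valueofX : List Int × Int := ([1, 2, 4], 3)

def Spec_valueofX (ar : List Int) (n : Int) (out : Int) : Prop := out = valueofX_alt ar n
instance (ar : List Int) (n : Int) (out : Int) : Decidable (Spec_valueofX ar n out) := by unfold Spec_valueofX; infer_instance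

-- ===== CLAIM =====
def Claim_equal_valueofX : Prop := ∀ (ar : List Int) (n : Int), Dom_valueofX ar n → Pre_valueofX ar n → Spec_valueofX ar n (valueofX ar n)

-- ===== LEMMAS AND PROOFS =====

-- The telescoped difference of the two accumulators of A's loop, over any element list.
theorem pv_fold_diff (A : Int) (xs : List Int) (pA pB : Int) :
    (xs.foldl (fun (p : Int × Int) x =>
        (p.1 + (x - A) * (x - A), p.2 + (x - (A + 1)) * (x - (A + 1)))) (pA, pB)).1
      - (xs.foldl (fun (p : Int × Int) x =>
        (p.1 + (x - A) * (x - A), p.2 + (x - (A + 1)) * (x - (A + 1)))) (pA, pB)).2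
    = pA - pB + 2 * xs.sum - (xs.length : Int) * (2 * A + 1) := by
  induction xs generalizing pA pB with
  | nil => simp
  | cons x xs ih =>
    simp only [List.foldl_cons, List.sum_cons, List.length_cons]
    rw [ih]
    push_cast
    ring

-- A's loop over range(m) of ar[i] is a fold over the first m elements of ar.
theorem pv_fold_range_take {β : Type} (ar : List Int) (f : β → Int → β) (m : Nat)
    (hm : m ≤ ar.length) (init : β) :
    (PySem.List.pyRange 0 (m : Int) 1).foldl
      (fun acc i => f acc (PySem.List.pyGetD ar i 0)) init
    = (ar.take m).foldl f init := by
  induction m generalizing init with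
  | zero => simp [PySem.List.pyRange_one_eq_nil]
  | succ k ih =>
    have hk : k < ar.length := Nat.lt_of_succ_le hm
    have hsplit : PySem.List.pyRange 0 ((k + 1 : Nat) : Int) 1
        = PySem.List.pyRange 0 (k : Int) 1 ++ [(k : Int)] := by
      have := PySem.List.pyRange_one_succ_right (a := 0) (b := (k : Int)) (by positivity)
      push_cast
      exact this
    rw [hsplit, List.foldl_append, ih (Nat.le_of_lt hk)]
    have htake : ar.take (k + 1) = ar.take k ++ [ar[k]] := by
      rw [List.take_add_one, List.getElem?_eq_getElem hk]
      rfl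
    rw [htake, List.foldl_append]
    simp [PySem.List.pyGetD_natCast, List.getD_eq_getElem?_getD, List.getElem?_eq_getElem hk]

theorem pv_foldl_add (xs : List Int) (s : Int) : xs.foldl (· + ·) s = s + xs.sum := by
  induction xs generalizing s with
  | nil => simp
  | cons x xs ih => simp [ih]; ring

theorem valueofX_spec' (ar : List Int) (n : Int)
    (hn : 0 < n) (hpre : n = (ar.length : Int) ∨ n ∣ ar.sum) :
    valueofX ar n = valueofX_alt ar n := by
  unfold valueofX valueofX_alt
  simp only []
  set summ := ar.foldl (· + ·) 0 with hsumm
  set q := PySem.Int.floordiv summ n with hq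
  set r := PySem.Int.mod summ n with hrdef
  have hsum : summ = ar.sum := by simpa using pv_foldl_add ar 0
  have hqr : q * n + r = summ := PySem.Int.floordiv_mul_add_mod summ n
  by_cases hz : r = 0
  · simp [hz, hn]
  · have hlen : n = (ar.length : Int) := by
      rcases hpre with h | h
      · exact h
      · exact absurd (by rw [hrdef, hsum]; exact (PySem.Int.mod_eq_zero_iff_dvd _ _).mpr h) hz
    simp only [hz, if_false]
    have hle : n.toNat ≤ ar.length := by omega
    have hcast : ((n.toNat : Nat) : Int) = n := by omega
    have hfold : (PySem.List.pyRange 0 n 1).foldl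
        (fun (p : Int × Int) i =>
          (p.1 + (PySem.List.pyGetD ar i 0 - q) * (PySem.List.pyGetD ar i 0 - q),
           p.2 + (PySem.List.pyGetD ar i 0 - (q + 1)) * (PySem.List.pyGetD ar i 0 - (q + 1))))
        ((0 : Int), (0 : Int))
      = (ar.take n.toNat).foldl (fun (p : Int × Int) x =>
          (p.1 + (x - q) * (x - q), p.2 + (x - (q + 1)) * (x - (q + 1)))) (0, 0) := by
      have := pv_fold_range_take ar
        (fun (p : Int × Int) x =>
          (p.1 + (x - q) * (x - q), p.2 + (x - (q + 1)) * (x - (q + 1))))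
        n.toNat hle ((0 : Int), (0 : Int))
      rw [hcast] at this
      exact this
    have htake : ar.take n.toNat = ar := List.take_of_length_le (by omega)
    have hdiff := pv_fold_diff q (ar.take n.toNat) 0 0
    rw [htake] at hdiff
    rw [hfold, htake]
    -- ValueA < ValueB  ↔  2*sum < n*(2q+1)  ↔  2r < n
    have hqn : q * n = ar.sum - r := by rw [hsum] at hqr; omega
    have hexp : (ar.length : Int) * (2 * q + 1) = 2 * ar.sum - 2 * r + n := by
      rw [← hlen]
      calc n * (2 * q + 1) = 2 * (q * n) + n := by ring
        _ = 2 * (ar.sum - r) + n := by rw [hqn]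
        _ = 2 * ar.sum - 2 * r + n := by ring
    rw [hexp] at hdiff
    by_cases hlt : 2 * r < n
    · rw [if_pos (by omega), if_pos hlt]
    · rw [if_neg (by omega), if_neg hlt]

-- ===== VERDICT =====
theorem valueofX_spec : Claim_equal_valueofX := by
  intro ar n _ hpre
  exact valueofX_spec' ar n hpre.1 hpre.2
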